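-- pv_equiv track=rewrite | github.com/maximromanov/jedli | modules/jedli_logic.py | make_search_options_cell
-- ===== SOURCE A (Python) =====
-- def make_search_options_cell(dic):
--     """Make the contents of a search options cell
--     in the metadata table"""
--
--     order_list = [
--                   ("prefixes: ", ["simpleSearch", "prefixes", "prefix_masdar",
--                                   "perfect_i", "prefix_article", "prefix_preposition",
--                                   "prefix_personal", "prefix_future", "prefix_lila",
--                                   "prefix_conjunction", "prefix_interr"]),
--                   ("suffixes:", ["suffixes", "suffix_nisba", "suffix_case",
--                                  "suffix_verb_infl", "suffix_pronom"]),
--                   ("other options:", ["alif_option", "ta_marb_option",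
--                                       "alif_maqs_option"])
--                   ]
--
--     cell_html = ''
--     for tup in order_list:
--         list_html = ''
--         for k in dic:
--             if k in tup[1]:
--                 if dic[k]:
--                     list_html += '    <li>{}</li>'.format(dic[k])
--         if list_html:
--             cell_html += tup[0] + '\n'
--             cell_html += '  <ul>\n'
--             cell_html += list_html
--             cell_html += '  </ul>\n'
--     return cell_html
-- ===== SOURCE B (Python) =====
-- _GROUPS = [
--     ["simpleSearch", "prefixes", "prefix_masdar",
--      "perfect_i", "prefix_article", "prefix_preposition",
--      "prefix_personal", "prefix_future", "prefix_lila",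
--      "prefix_conjunction", "prefix_interr"],
--     ["suffixes", "suffix_nisba", "suffix_case",
--      "suffix_verb_infl", "suffix_pronom"],
--     ["alif_option", "ta_marb_option", "alif_maqs_option"],
-- ]
-- _HEADERS = ["prefixes: ", "suffixes:", "other options:"]
-- _GROUP_OF = {k: i for i, keys in enumerate(_GROUPS) for k in keys}
--
--
-- def make_search_options_cell(dic):
--     """Make the contents of a search options cell
--     in the metadata table"""
--     items = [[], [], []]
--     for k, v in dic.items():
--         if v and k in _GROUP_OF:
--             items[_GROUP_OF[k]].append('    <li>{}</li>'.format(v))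
--     parts = []
--     for i, header in enumerate(_HEADERS):
--         if items[i]:
--             parts.append(header + '\n' + '  <ul>\n' + ''.join(items[i]) + '  </ul>\n')
--     return ''.join(parts)
-- ===== Notes on version B (the rewrite author's own statement) =====
-- stated objective: alternative
-- what changed: B builds an inverted key->group dict once, collects each group's <li> items in one pass over the dict with dict lookups, and emits the three header/<ul> sections in a separate phase, instead of A's three full scans over the dict each with a linear membership test and a dict lookup per hit.
import Mathlib
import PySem

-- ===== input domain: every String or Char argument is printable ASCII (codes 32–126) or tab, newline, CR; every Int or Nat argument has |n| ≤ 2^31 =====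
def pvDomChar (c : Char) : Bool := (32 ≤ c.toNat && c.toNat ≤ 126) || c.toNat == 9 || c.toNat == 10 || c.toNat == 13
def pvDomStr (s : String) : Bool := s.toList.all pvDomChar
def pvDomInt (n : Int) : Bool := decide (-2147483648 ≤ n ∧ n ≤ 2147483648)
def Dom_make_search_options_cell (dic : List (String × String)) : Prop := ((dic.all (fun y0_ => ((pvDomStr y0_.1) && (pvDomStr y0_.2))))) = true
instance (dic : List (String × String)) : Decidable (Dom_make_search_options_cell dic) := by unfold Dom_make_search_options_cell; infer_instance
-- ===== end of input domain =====

-- B replaces A's three membership scans over the dict by an inverted key→group index,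
-- one collecting pass over the dict and a separate emission phase (objective: alternative decomposition).

-- shared literal data (the option-key groups and headers from A's order_list)
def pvG0 : List String :=
  ["simpleSearch", "prefixes", "prefix_masdar", "perfect_i", "prefix_article",
   "prefix_preposition", "prefix_personal", "prefix_future", "prefix_lila",
   "prefix_conjunction", "prefix_interr"]
def pvG1 : List String :=
  ["suffixes", "suffix_nisba", "suffix_case", "suffix_verb_infl", "suffix_pronom"]
def pvG2 : List String := ["alif_option", "ta_marb_option", "alif_maqs_option"]
def pvItem (v : String) : String := "    <li>" ++ v ++ "</li>"

-- ===== PORT A =====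
def pvOrderList : List (String × List String) :=
  [("prefixes: ", pvG0), ("suffixes:", pvG1), ("other options:", pvG2)]

def make_search_options_cell (dic : List (String × String)) : String :=
  pvOrderList.foldl (fun cell_html tup =>
    let list_html := dic.foldl (fun lh kv =>
      if kv.1 ∈ tup.2 then
        -- dic[k]: dict lookup; the key is present, so KeyError is impossible
        let v := ((PySem.Dict.mk dic).get? kv.1).getD ""
        if v ≠ "" then lh ++ pvItem v else lh
      else lh) ""
    if list_html ≠ "" then
      cell_html ++ tup.1 ++ "\n" ++ "  <ul>\n" ++ list_html ++ "  </ul>\n"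
    else cell_html) ""

-- ===== PORT B =====
def pvHeaders : List String := ["prefixes: ", "suffixes:", "other options:"]

def pvGroupOf : PySem.Dict String Int :=
  (PySem.List.enumerate [pvG0, pvG1, pvG2]).foldl
    (fun d p => p.2.foldl (fun d k => d.insert k p.1) d) PySem.Dict.empty

def make_search_options_cell_alt (dic : List (String × String)) : String :=
  let items := dic.foldl
    (fun (it : List String × List String × List String) kv =>
      if kv.2 ≠ "" then
        match pvGroupOf.get? kv.1 with
        | some 0 => (it.1 ++ [pvItem kv.2], it.2.1, it.2.2)
        | some 1 => (it.1, it.2.1 ++ [pvItem kv.2], it.2.2)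
        | some 2 => (it.1, it.2.1, it.2.2 ++ [pvItem kv.2])
        | _ => it
      else it) ([], [], [])
  let parts := (PySem.List.enumerate pvHeaders).foldl
    (fun ps p =>
      let gitems := match p.1 with | 0 => items.1 | 1 => items.2.1 | _ => items.2.2
      if gitems ≠ [] then
        ps ++ [p.2 ++ "\n" ++ "  <ul>\n" ++ String.join gitems ++ "  </ul>\n"]
      else ps) []
  String.join parts

-- ===== PRECONDITION & SPEC =====
-- Pre_ excludes association lists with duplicate keys, which cannot arise from a Python
-- dict (A's parameter is a dict, so its keys are necessarily distinct); on such lists the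
-- list↔dict correspondence of the type convention is ambiguous.
def Pre_make_search_options_cell (dic : List (String × String)) : Prop :=
  (dic.map Prod.fst).Nodup

instance (dic : List (String × String)) : Decidable (Pre_make_search_options_cell dic) := by
  unfold Pre_make_search_options_cell; infer_instance

def pvWitness_make_search_options_cell : (List (String × String)) :=
  [("prefixes", "ab"), ("suffixes", "x y"), ("other", "z"), ("alif_option", "")]

def Spec_make_search_options_cell (dic : List (String × String)) (out : String) : Prop := out = make_search_options_cell_alt dic
instance (dic : List (String × String)) (out : String) : Decidable (Spec_make_search_options_cell dic out) := by unfold Spec_make_search_options_cell; infer_instance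

-- ===== CLAIM (what is proved, stated in full; the proofs are below) =====
def Claim_equal_make_search_options_cell : Prop := ∀ (dic : List (String × String)), Dom_make_search_options_cell dic → Pre_make_search_options_cell dic → Spec_make_search_options_cell dic (make_search_options_cell dic)

-- ===== LEMMAS AND PROOFS =====

theorem pvWitness_ok :
    Dom_make_search_options_cell pvWitness_make_search_options_cell ∧
    Pre_make_search_options_cell pvWitness_make_search_options_cell := by
  constructor <;> decide

theorem pvGroupOf_eq : pvGroupOf = PySem.Dict.mk
    ((pvG0.map (·, (0:Int))) ++ (pvG1.map (·, 1)) ++ (pvG2.map (·, 2))) := by rfl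

set_option maxHeartbeats 1000000 in
theorem classify (k : String) : pvGroupOf.get? k =
    (if k ∈ pvG0 then some 0 else if k ∈ pvG1 then some 1 else if k ∈ pvG2 then some 2 else none) := by
  rw [pvGroupOf_eq]
  by_cases h0 : k = "simpleSearch"
  · subst h0; decide
  by_cases h1 : k = "prefixes"
  · subst h1; decide
  by_cases h2 : k = "prefix_masdar"
  · subst h2; decide
  by_cases h3 : k = "perfect_i"
  · subst h3; decide
  by_cases h4 : k = "prefix_article"
  · subst h4; decide
  by_cases h5 : k = "prefix_preposition"
  · subst h5; decide
  by_cases h6 : k = "prefix_personal"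
  · subst h6; decide
  by_cases h7 : k = "prefix_future"
  · subst h7; decide
  by_cases h8 : k = "prefix_lila"
  · subst h8; decide
  by_cases h9 : k = "prefix_conjunction"
  · subst h9; decide
  by_cases h10 : k = "prefix_interr"
  · subst h10; decide
  by_cases h11 : k = "suffixes"
  · subst h11; decide
  by_cases h12 : k = "suffix_nisba"
  · subst h12; decide
  by_cases h13 : k = "suffix_case"
  · subst h13; decide
  by_cases h14 : k = "suffix_verb_infl"
  · subst h14; decide
  by_cases h15 : k = "suffix_pronom"
  · subst h15; decide
  by_cases h16 : k = "alif_option"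
  · subst h16; decide
  by_cases h17 : k = "ta_marb_option"
  · subst h17; decide
  by_cases h18 : k = "alif_maqs_option"
  · subst h18; decide
  simp only [pvG0, pvG1, pvG2, List.map, List.cons_append, List.nil_append,
    PySem.Dict.get?_mk_cons, List.mem_cons, List.not_mem_nil, or_false, beq_iff_eq]
  simp [PySem.Dict.get?, eq_comm, h0, h1, h2, h3, h4, h5, h6, h7, h8, h9, h10, h11, h12, h13, h14, h15, h16, h17, h18]

theorem d01 : ∀ k ∈ pvG0, k ∉ pvG1 := by decide
theorem d02 : ∀ k ∈ pvG0, k ∉ pvG2 := by decide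
theorem d12 : ∀ k ∈ pvG1, k ∉ pvG2 := by decide

-- the items one group contributes, as a list of formatted <li> strings
def pvSel (g : List String) (dic : List (String × String)) : List String :=
  dic.filterMap (fun kv => if kv.1 ∈ g ∧ kv.2 ≠ "" then some (pvItem kv.2) else none)

theorem pvItem_ne_empty (v : String) : pvItem v ≠ "" := by
  simp [pvItem, String.append_eq_empty_iff]

theorem foldl_append_join (l : List String) (s : String) :
    l.foldl (fun r x => r ++ x) s = s ++ String.join l := by
  induction l generalizing s with
  | nil => simp [String.join]
  | cons a t ih =>
    simp only [String.join, List.foldl]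
    rw [ih, ih ("" ++ a)]
    simp [String.append_assoc]

theorem join_cons (x : String) (l : List String) :
    String.join (x :: l) = x ++ String.join l := by
  simp only [String.join, List.foldl]
  rw [foldl_append_join, String.empty_append]
  rfl

theorem join_sel_eq_empty_iff (g : List String) (dic : List (String × String)) :
    (String.join (pvSel g dic) = "" ↔ pvSel g dic = []) := by
  cases hl : pvSel g dic with
  | nil => simp [String.join]
  | cons a t =>
    have ha : a ≠ "" := by
      have hall : ∀ x ∈ pvSel g dic, x ≠ "" := by
        intro x hx
        simp only [pvSel, List.mem_filterMap] at hx
        obtain ⟨kv, -, hkv⟩ := hx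
        split at hkv
        · cases hkv; exact pvItem_ne_empty _
        · cases hkv
      exact hall a (hl ▸ List.mem_cons_self ..)
    rw [join_cons]
    constructor
    · intro he
      exact absurd (String.append_eq_empty_iff.mp he).1 ha
    · intro he; cases he

-- A's inner pass for one group, with the dict lookup replaced by the pair's own
-- value (valid under Pre_: keys are distinct, so dic[k] is the value paired with k)
theorem lookup_mem (dic : List (String × String)) (h : (dic.map Prod.fst).Nodup)
    (kv : String × String) (hkv : kv ∈ dic) :
    (PySem.Dict.mk dic).get? kv.1 = some kv.2 := by
  induction dic with
  | nil => cases hkv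
  | cons hd tl ih =>
    obtain ⟨k, v⟩ := hd
    simp only [List.map, List.nodup_cons] at h
    rw [PySem.Dict.get?_mk_cons]
    rcases List.mem_cons.mp hkv with he | ht
    · subst he; simp
    · have hne : (k == kv.1) = false := by
        simp only [beq_eq_false_iff_ne, ne_eq]
        intro hc
        exact h.1 (hc ▸ List.mem_map_of_mem ht)
      rw [hne]
      exact ih h.2 ht

theorem plain_fold (g : List String) (dic : List (String × String)) (s : String) :
    dic.foldl (fun lh kv => if kv.1 ∈ g ∧ kv.2 ≠ "" then lh ++ pvItem kv.2 else lh) s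
      = s ++ String.join (pvSel g dic) := by
  induction dic generalizing s with
  | nil => simp [pvSel, String.join]
  | cons hd tl ih =>
    simp only [List.foldl, pvSel, List.filterMap]
    by_cases hc : hd.1 ∈ g ∧ hd.2 ≠ ""
    · simp only [if_pos hc, ih]
      show s ++ pvItem hd.2 ++ String.join (pvSel g tl)
          = s ++ String.join (pvItem hd.2 :: pvSel g tl)
      rw [join_cons, String.append_assoc]
    · simp only [if_neg hc, ih]
      rfl

theorem A_inner_eq (dic : List (String × String)) (h : (dic.map Prod.fst).Nodup)
    (g : List String) :
    dic.foldl (fun lh kv =>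
      if kv.1 ∈ g then
        if ((PySem.Dict.mk dic).get? kv.1).getD "" ≠ "" then
          lh ++ pvItem (((PySem.Dict.mk dic).get? kv.1).getD "")
        else lh
      else lh) ""
    = String.join (pvSel g dic) := by
  rw [PySem.List.foldl_congr_mem dic _
      (fun lh kv => if kv.1 ∈ g ∧ kv.2 ≠ "" then lh ++ pvItem kv.2 else lh) ""
      ?_]
  · rw [plain_fold, String.empty_append]
  · intro acc kv hkv
    rw [lookup_mem dic h kv hkv]
    by_cases hm : kv.1 ∈ g
    · simp [hm]
    · simp [hm]

theorem step_eq (it : List String × List String × List String) (kv : String × String) :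
    (if kv.2 ≠ "" then
       match pvGroupOf.get? kv.1 with
       | some 0 => (it.1 ++ [pvItem kv.2], it.2.1, it.2.2)
       | some 1 => (it.1, it.2.1 ++ [pvItem kv.2], it.2.2)
       | some 2 => (it.1, it.2.1, it.2.2 ++ [pvItem kv.2])
       | _ => it
     else it)
    = (it.1 ++ (if kv.1 ∈ pvG0 ∧ kv.2 ≠ "" then [pvItem kv.2] else []),
       it.2.1 ++ (if kv.1 ∈ pvG1 ∧ kv.2 ≠ "" then [pvItem kv.2] else []),
       it.2.2 ++ (if kv.1 ∈ pvG2 ∧ kv.2 ≠ "" then [pvItem kv.2] else [])) := by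
  rw [classify]
  by_cases hv : kv.2 = ""
  · simp [hv]
  · by_cases m0 : kv.1 ∈ pvG0
    · simp [hv, m0, d01 _ m0, d02 _ m0]
    · by_cases m1 : kv.1 ∈ pvG1
      · simp [hv, m0, m1, d12 _ m1]
      · by_cases m2 : kv.1 ∈ pvG2
        · simp [hv, m0, m1, m2]
        · simp [hv, m0, m1, m2]

theorem items_spec (dic : List (String × String)) (a0 a1 a2 : List String) :
    dic.foldl
      (fun (it : List String × List String × List String) kv =>
        if kv.2 ≠ "" then
          match pvGroupOf.get? kv.1 with
          | some 0 => (it.1 ++ [pvItem kv.2], it.2.1, it.2.2)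
          | some 1 => (it.1, it.2.1 ++ [pvItem kv.2], it.2.2)
          | some 2 => (it.1, it.2.1, it.2.2 ++ [pvItem kv.2])
          | _ => it
        else it) (a0, a1, a2)
    = (a0 ++ pvSel pvG0 dic, a1 ++ pvSel pvG1 dic, a2 ++ pvSel pvG2 dic) := by
  induction dic generalizing a0 a1 a2 with
  | nil => simp [pvSel]
  | cons hd tl ih =>
    rw [List.foldl_cons]
    have := step_eq (a0, a1, a2) hd
    simp only at this
    rw [this, ih]
    by_cases hv : hd.2 = "" <;>
      by_cases m0 : hd.1 ∈ pvG0 <;>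
        by_cases m1 : hd.1 ∈ pvG1 <;>
          by_cases m2 : hd.1 ∈ pvG2 <;>
            simp [pvSel, hv, m0, m1, m2, List.append_assoc]

def pvEmit (c h s : String) : String :=
  if s ≠ "" then c ++ h ++ "\n" ++ "  <ul>\n" ++ s ++ "  </ul>\n" else c

def pvSeg (h : String) (l : List String) : String :=
  h ++ "\n" ++ "  <ul>\n" ++ String.join l ++ "  </ul>\n"

theorem A_closed (dic : List (String × String)) (h : (dic.map Prod.fst).Nodup) :
    make_search_options_cell dic =
      pvEmit (pvEmit (pvEmit "" "prefixes: " (String.join (pvSel pvG0 dic)))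
          "suffixes:" (String.join (pvSel pvG1 dic)))
        "other options:" (String.join (pvSel pvG2 dic)) := by
  unfold make_search_options_cell
  simp only [pvOrderList, List.foldl, pvEmit]
  rw [A_inner_eq dic h pvG0, A_inner_eq dic h pvG1, A_inner_eq dic h pvG2]

theorem B_closed (dic : List (String × String)) :
    make_search_options_cell_alt dic =
      String.join
        ((if pvSel pvG0 dic ≠ [] then [pvSeg "prefixes: " (pvSel pvG0 dic)] else []) ++
         (if pvSel pvG1 dic ≠ [] then [pvSeg "suffixes:" (pvSel pvG1 dic)] else []) ++
         (if pvSel pvG2 dic ≠ [] then [pvSeg "other options:" (pvSel pvG2 dic)] else [])) := by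
  unfold make_search_options_cell_alt
  rw [items_spec dic [] [] []]
  simp only [List.nil_append, pvHeaders, PySem.List.enumerate, List.foldl, pvSeg]
  by_cases h0 : pvSel pvG0 dic = [] <;>
    by_cases h1 : pvSel pvG1 dic = [] <;>
      by_cases h2 : pvSel pvG2 dic = [] <;>
        simp [h0, h1, h2]

theorem join_nil : String.join ([] : List String) = "" := rfl

theorem make_search_options_cell_spec : Claim_equal_make_search_options_cell := by
  intro dic _ hpre
  unfold Spec_make_search_options_cell
  rw [A_closed dic hpre, B_closed dic]
  simp only [pvEmit, pvSeg, ne_eq, join_sel_eq_empty_iff]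
  by_cases h0 : pvSel pvG0 dic = [] <;>
    by_cases h1 : pvSel pvG1 dic = [] <;>
      by_cases h2 : pvSel pvG2 dic = [] <;>
        simp [h0, h1, h2, join_cons, join_nil, String.append_assoc,
          String.empty_append, String.append_empty] <;>
        simp [← String.append_assoc]
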